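-- pv_equiv track=rewrite | github.com/yamuyi/LM-Is-All-You-Need | 3、生产力工具篇/html2image_toolkit/src/converters/html2md.py | postprocess_markdown
-- ===== SOURCE A (Python) =====
-- def postprocess_markdown(markdown_content: str) -> str:
--     """后处理Markdown，移除重复内容"""
--     lines = markdown_content.split('\n')
--     seen_lines = set()
--     unique_lines = []
--
--     for line in lines:
--         # 跳过空行和重复行
--         line_stripped = line.strip()
--         if line_stripped and line_stripped not in seen_lines:
--             seen_lines.add(line_stripped)
--             unique_lines.append(line)
--         elif not line_stripped:
--             # 保留空行但避免连续多个空行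
--             if not unique_lines or unique_lines[-1].strip():
--                 unique_lines.append(line)
--
--     return '\n'.join(unique_lines)
-- ===== SOURCE B (Python) =====
-- def postprocess_markdown(markdown_content: str) -> str:
--     """Two-pass rewrite: (1) drop repeated non-blank lines, (2) collapse blank runs."""
--     # Pass 1: keep blanks as-is, keep each non-blank line only at its first (stripped) occurrence.
--     seen = set()
--     intermediate = []
--     for line in markdown_content.split('\n'):
--         s = line.strip()
--         if not s:
--             intermediate.append(line)
--         elif s not in seen:
--             seen.add(s)
--             intermediate.append(line)
--     # Pass 2: collapse consecutive blank lines, keeping the first of each run.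
--     result = []
--     allow_blank = True
--     for line in intermediate:
--         if line.strip():
--             result.append(line)
--             allow_blank = True
--         elif allow_blank:
--             result.append(line)
--             allow_blank = False
--         else:
--             allow_blank = False
--     return '\n'.join(result)
-- ===== Notes on version B (the rewrite author's own statement) =====
-- stated objective: alternative
-- what changed: A's single fused loop (dedup + blank-collapse decided against the tail of the growing output list) is split into two independent passes over an intermediate list: pass 1 deduplicates non-blank lines with a seen-set keeping all blanks, pass 2 collapses blank runs with a boolean flag instead of inspecting unique_lines[-1].
import Mathlib
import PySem

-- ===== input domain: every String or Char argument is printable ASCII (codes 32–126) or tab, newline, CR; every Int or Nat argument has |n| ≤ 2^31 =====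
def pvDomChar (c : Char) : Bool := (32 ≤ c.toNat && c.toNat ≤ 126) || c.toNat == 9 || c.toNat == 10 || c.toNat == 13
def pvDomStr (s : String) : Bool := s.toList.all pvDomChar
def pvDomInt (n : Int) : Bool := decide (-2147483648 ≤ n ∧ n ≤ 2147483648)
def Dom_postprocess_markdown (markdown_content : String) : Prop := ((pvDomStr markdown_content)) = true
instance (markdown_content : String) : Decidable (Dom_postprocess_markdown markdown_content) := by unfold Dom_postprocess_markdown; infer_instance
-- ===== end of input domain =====

-- B replaces A's single fused loop by two passes (a dedup pass over the lines, then a blank-collapse pass over the intermediate list); alternative decomposition, same cost.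

-- ===== PORT A =====
-- s.split('\n'): sep ≠ "", so split? is always some; getD [] never fires
def postprocess_markdown (markdown_content : String) : String :=
  let lines := (PySem.Str.split? markdown_content "\n").getD []
  let st := lines.foldl
    (fun (acc : PySem.Set String × List String) line =>
      let line_stripped := PySem.Str.strip line
      if line_stripped != "" && !(PySem.Set.contains acc.1 line_stripped) then
        (PySem.Set.add acc.1 line_stripped, acc.2 ++ [line])
      else if line_stripped == "" then
        (if acc.2.isEmpty || (PySem.Str.strip (acc.2.getLastD "") != "") then
          (acc.1, acc.2 ++ [line])
        else acc)
      else acc)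
    (PySem.Set.empty, [])
  PySem.Str.join "\n" st.2

-- ===== PORT B =====
def postprocess_markdown_alt (markdown_content : String) : String :=
  -- pass 1: keep blanks, keep each non-blank line only at its first stripped occurrence
  let inter := (((PySem.Str.split? markdown_content "\n").getD []).foldl
    (fun (acc : PySem.Set String × List String) line =>
      let s := PySem.Str.strip line
      if s == "" then (acc.1, acc.2 ++ [line])
      else if PySem.Set.contains acc.1 s then acc
      else (PySem.Set.add acc.1 s, acc.2 ++ [line]))
    (PySem.Set.empty, [])).2
  -- pass 2: collapse consecutive blank lines, keeping the first of each run
  let res := (inter.foldl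
    (fun (acc : List String × Bool) line =>
      if PySem.Str.strip line != "" then (acc.1 ++ [line], true)
      else if acc.2 then (acc.1 ++ [line], false)
      else (acc.1, false))
    ([], true)).1
  PySem.Str.join "\n" res

-- ===== PRECONDITION & SPEC =====
def Spec_postprocess_markdown (markdown_content : String) (out : String) : Prop := out = postprocess_markdown_alt markdown_content
instance (markdown_content : String) (out : String) : Decidable (Spec_postprocess_markdown markdown_content out) := by unfold Spec_postprocess_markdown; infer_instance

-- ===== CLAIM (what is proved, stated in full; the proofs are below) =====
def Claim_equal_postprocess_markdown : Prop := ∀ (markdown_content : String), Dom_postprocess_markdown markdown_content → Spec_postprocess_markdown markdown_content (postprocess_markdown markdown_content)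

-- ===== LEMMAS AND PROOFS =====

-- named copies of the three loop bodies (definitionally equal to the lambdas in the ports)
def pvStepA : PySem.Set String × List String → String → PySem.Set String × List String :=
  fun acc line =>
    let line_stripped := PySem.Str.strip line
    if line_stripped != "" && !(PySem.Set.contains acc.1 line_stripped) then
      (PySem.Set.add acc.1 line_stripped, acc.2 ++ [line])
    else if line_stripped == "" then
      (if acc.2.isEmpty || (PySem.Str.strip (acc.2.getLastD "") != "") then
        (acc.1, acc.2 ++ [line])
      else acc)
    else acc

def pvStepB1 : PySem.Set String × List String → String → PySem.Set String × List String :=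
  fun acc line =>
    let s := PySem.Str.strip line
    if s == "" then (acc.1, acc.2 ++ [line])
    else if PySem.Set.contains acc.1 s then acc
    else (PySem.Set.add acc.1 s, acc.2 ++ [line])

def pvStepB2 : List String × Bool → String → List String × Bool :=
  fun acc line =>
    if PySem.Str.strip line != "" then (acc.1 ++ [line], true)
    else if acc.2 then (acc.1 ++ [line], false)
    else (acc.1, false)

-- recursive reformulations of the three loops
def pvFusedR (seen : PySem.Set String) (allow : Bool) : List String → List String
  | [] => []
  | l :: ls =>
    let s := PySem.Str.strip l
    if s != "" && !(PySem.Set.contains seen s) then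
      l :: pvFusedR (PySem.Set.add seen s) true ls
    else if s == "" then
      (if allow then l :: pvFusedR seen false ls else pvFusedR seen false ls)
    else pvFusedR seen allow ls

def pvP1 (seen : PySem.Set String) : List String → List String
  | [] => []
  | l :: ls =>
    let s := PySem.Str.strip l
    if s == "" then l :: pvP1 seen ls
    else if PySem.Set.contains seen s then pvP1 seen ls
    else l :: pvP1 (PySem.Set.add seen s) ls

def pvP2 (allow : Bool) : List String → List String
  | [] => []
  | l :: ls =>
    if PySem.Str.strip l != "" then l :: pvP2 true ls
    else if allow then l :: pvP2 false ls else pvP2 false ls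

theorem pvA_foldl (ls : List String) (seen : PySem.Set String) (acc : List String) :
    (ls.foldl pvStepA (seen, acc)).2
      = acc ++ pvFusedR seen (acc.isEmpty || (PySem.Str.strip (acc.getLastD "") != "")) ls := by
  induction ls generalizing seen acc with
  | nil => simp [pvFusedR]
  | cons l ls ih =>
    rw [List.foldl_cons]
    by_cases h1 : PySem.Str.strip l = ""
    · by_cases h2 : (acc.isEmpty || (PySem.Str.strip (acc.getLastD "") != "")) = true
      · simp at h2
        have hs : pvStepA (seen, acc) l = (seen, acc ++ [l]) := by simp [pvStepA, h1, h2]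
        have hb : (acc ++ [l]).isEmpty = false := by simp
        rw [hs, ih]
        simp [pvFusedR, h1, h2, hb]
      · simp at h2
        have hs : pvStepA (seen, acc) l = (seen, acc) := by simp [pvStepA, h1, h2.1, h2.2]
        have hb : acc.isEmpty = false := by simp [h2.1]
        rw [hs, ih]
        simp [pvFusedR, h1, h2.2, hb]
    · have hb1 : (PySem.Str.strip l != "") = true := by simp [h1]
      by_cases h2 : PySem.Str.strip l ∈ seen
      · have hs : pvStepA (seen, acc) l = (seen, acc) := by simp [pvStepA, h1, h2]
        rw [hs, ih]
        simp [pvFusedR, h1, h2]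
      · have hs : pvStepA (seen, acc) l = (PySem.Set.add seen (PySem.Str.strip l), acc ++ [l]) := by
          simp [pvStepA, h1, h2]
        have hb : ((acc ++ [l]).isEmpty || (PySem.Str.strip ((acc ++ [l]).getLastD "") != "")) = true := by
          simp [h1]
        rw [hs, ih]
        simp [pvFusedR, h2, hb1]

theorem pvB1_foldl (ls : List String) (seen : PySem.Set String) (acc : List String) :
    (ls.foldl pvStepB1 (seen, acc)).2 = acc ++ pvP1 seen ls := by
  induction ls generalizing seen acc with
  | nil => simp [pvP1]
  | cons l ls ih =>
    rw [List.foldl_cons]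
    by_cases h1 : PySem.Str.strip l = ""
    · have hs : pvStepB1 (seen, acc) l = (seen, acc ++ [l]) := by simp [pvStepB1, h1]
      rw [hs, ih]; simp [pvP1, h1]
    · by_cases h2 : PySem.Str.strip l ∈ seen
      · have hs : pvStepB1 (seen, acc) l = (seen, acc) := by simp [pvStepB1, h1, h2]
        rw [hs, ih]; simp [pvP1, h1, h2]
      · have hs : pvStepB1 (seen, acc) l = (PySem.Set.add seen (PySem.Str.strip l), acc ++ [l]) := by
          simp [pvStepB1, h1, h2]
        rw [hs, ih]; simp [pvP1, h1, h2]

theorem pvB2_foldl (ls : List String) (allow : Bool) (acc : List String) :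
    (ls.foldl pvStepB2 (acc, allow)).1 = acc ++ pvP2 allow ls := by
  induction ls generalizing allow acc with
  | nil => simp [pvP2]
  | cons l ls ih =>
    rw [List.foldl_cons]
    by_cases h1 : PySem.Str.strip l = ""
    · cases allow with
      | true =>
        have hs : pvStepB2 (acc, true) l = (acc ++ [l], false) := by simp [pvStepB2, h1]
        rw [hs, ih]; simp [pvP2, h1]
      | false =>
        have hs : pvStepB2 (acc, false) l = (acc, false) := by simp [pvStepB2, h1]
        rw [hs, ih]; simp [pvP2, h1]
    · have hs : pvStepB2 (acc, allow) l = (acc ++ [l], true) := by simp [pvStepB2, h1]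
      rw [hs, ih]; simp [pvP2, h1]

theorem pvMain (ls : List String) (seen : PySem.Set String) (allow : Bool) :
    pvP2 allow (pvP1 seen ls) = pvFusedR seen allow ls := by
  induction ls generalizing seen allow with
  | nil => simp [pvP1, pvP2, pvFusedR]
  | cons l ls ih =>
    by_cases h1 : PySem.Str.strip l = ""
    · cases allow <;> simp [pvP1, pvFusedR, pvP2, h1, ih]
    · by_cases h2 : PySem.Str.strip l ∈ seen
      · simp [pvP1, pvFusedR, h1, h2, ih]
      · simp [pvP1, pvFusedR, pvP2, h1, h2, ih]

-- ===== VERDICT (by name: the statement is the Claim_ definition above) =====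
theorem postprocess_markdown_spec : Claim_equal_postprocess_markdown := by
  intro m _
  show PySem.Str.join "\n"
      ((((PySem.Str.split? m "\n").getD []).foldl pvStepA (PySem.Set.empty, [])).2)
    = PySem.Str.join "\n"
      (((((PySem.Str.split? m "\n").getD []).foldl pvStepB1 (PySem.Set.empty, [])).2).foldl
        pvStepB2 ([], true)).1
  rw [pvA_foldl, pvB1_foldl, pvB2_foldl]
  simp only [List.nil_append]
  rw [pvMain]
  rfl
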